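-- pv_equiv track=rewrite | github.com/RichiiiTV/GreyModel | src/greymodel/tiling.py | verify_defect_coverage
-- ===== SOURCE A (Python) =====
-- from dataclasses import dataclass
-- from typing import List, Sequence, Tuple
--
-- @dataclass(frozen=True)
-- class TileGrid:
--     image_size: Tuple[int, int]
--     tile_size: Tuple[int, int]
--     stride: Tuple[int, int]
--     boxes: Tuple[Tuple[int, int, int, int], ...]
--     grid_shape: Tuple[int, int]
--
-- def _axis_positions(length: int, tile: int, stride: int) -> List[int]:
--     if tile <= 0 or stride <= 0:
--         raise ValueError("Tile size and stride must be positive.")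
--     if tile > length:
--         return [0]
--     positions = list(range(0, max(length - tile + 1, 1), stride))
--     last = length - tile
--     if not positions:
--         positions = [0]
--     elif positions[-1] != last:
--         positions.append(last)
--     return positions
--
-- def build_tile_grid(
--     image_size: Tuple[int, int],
--     tile_size: Tuple[int, int],
--     stride: Tuple[int, int],
-- ) -> TileGrid:
--     image_h, image_w = image_size
--     tile_h, tile_w = tile_size
--     stride_h, stride_w = stride
--     y_positions = _axis_positions(image_h, tile_h, stride_h)
--     x_positions = _axis_positions(image_w, tile_w, stride_w)
--     boxes = []
--     for y in y_positions:
--         for x in x_positions: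
--             boxes.append((y, x, min(y + tile_h, image_h), min(x + tile_w, image_w)))
--     return TileGrid(
--         image_size=image_size,
--         tile_size=tile_size,
--         stride=stride,
--         boxes=tuple(boxes),
--         grid_shape=(len(y_positions), len(x_positions)),
--     )
--
-- def verify_defect_coverage(
--     image_size: Tuple[int, int],
--     tile_size: Tuple[int, int],
--     stride: Tuple[int, int],
--     defect_size: Tuple[int, int] = (5, 5),
-- ) -> Tuple[bool, int]:
--     image_h, image_w = image_size
--     defect_h, defect_w = defect_size
--     if defect_h > image_h or defect_w > image_w:
--         return False, 0
--
--     grid = build_tile_grid(image_size, tile_size, stride)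
--     uncovered = 0
--     for defect_y in range(0, image_h - defect_h + 1):
--         defect_y2 = defect_y + defect_h
--         for defect_x in range(0, image_w - defect_w + 1):
--             defect_x2 = defect_x + defect_w
--             contains = any(
--                 y1 <= defect_y and defect_y2 <= y2 and x1 <= defect_x and defect_x2 <= x2
--                 for y1, x1, y2, x2 in grid.boxes
--             )
--             if not contains:
--                 uncovered += 1
--     return uncovered == 0, uncovered
-- ===== SOURCE B (Python) =====
-- def _axis_positions(length, tile, stride):
--     if tile <= 0 or stride <= 0:
--         raise ValueError("Tile size and stride must be positive.")
--     if tile > length: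
--         return [0]
--     positions = list(range(0, max(length - tile + 1, 1), stride))
--     last = length - tile
--     if not positions:
--         positions = [0]
--     elif positions[-1] != last:
--         positions.append(last)
--     return positions
--
--
-- def verify_defect_coverage(image_size, tile_size, stride, defect_size=(5, 5)):
--     # Separable: a defect is covered by some tile iff its y-interval is covered
--     # by some tile row AND its x-interval by some tile column, so count each
--     # axis independently instead of scanning every (y, x, box) triple.
--     image_h, image_w = image_size
--     defect_h, defect_w = defect_size
--     if defect_h > image_h or defect_w > image_w:
--         return False, 0
--     tile_h, tile_w = tile_size
--     ys = _axis_positions(image_h, tile_h, stride[0])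
--     xs = _axis_positions(image_w, tile_w, stride[1])
--     n_y = image_h - defect_h + 1
--     n_x = image_w - defect_w + 1
--     c_y = sum(1 for dy in range(n_y)
--               if any(y <= dy and dy + defect_h <= min(y + tile_h, image_h) for y in ys))
--     c_x = sum(1 for dx in range(n_x)
--               if any(x <= dx and dx + defect_w <= min(x + tile_w, image_w) for x in xs))
--     uncovered = n_y * n_x - c_y * c_x
--     return uncovered == 0, uncovered
-- ===== Notes on version B (the rewrite author's own statement) =====
-- stated objective: faster
-- what changed: B exploits x/y separability of the tile grid: a defect is covered iff some tile row covers its y-interval and some tile column its x-interval, so B counts covered positions per axis and computes uncovered = nY*nX - cY*cX instead of testing every (y,x) placement against every box.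
import Mathlib
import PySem

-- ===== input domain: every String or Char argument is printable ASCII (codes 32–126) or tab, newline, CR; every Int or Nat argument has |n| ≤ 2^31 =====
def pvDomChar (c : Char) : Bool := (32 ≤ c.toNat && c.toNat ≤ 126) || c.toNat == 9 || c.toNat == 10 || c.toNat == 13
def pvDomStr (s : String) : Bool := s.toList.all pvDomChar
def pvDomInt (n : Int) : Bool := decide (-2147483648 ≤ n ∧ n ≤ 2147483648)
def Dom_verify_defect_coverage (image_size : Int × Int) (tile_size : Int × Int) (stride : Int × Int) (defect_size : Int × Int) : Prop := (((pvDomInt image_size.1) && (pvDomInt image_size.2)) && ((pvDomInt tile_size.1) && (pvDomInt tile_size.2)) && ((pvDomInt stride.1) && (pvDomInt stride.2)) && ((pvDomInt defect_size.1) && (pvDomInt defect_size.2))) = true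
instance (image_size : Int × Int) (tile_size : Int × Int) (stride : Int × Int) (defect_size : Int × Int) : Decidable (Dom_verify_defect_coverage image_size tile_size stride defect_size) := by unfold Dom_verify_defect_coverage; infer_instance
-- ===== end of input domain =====

-- B replaces A's scan of every defect position against every tile box by two independent
-- per-axis covered-position counts (the tile grid is a product of y- and x-positions),
-- computing the same (ok, uncovered) pair without the per-placement box scan.

-- ===== PORT A =====
-- shared helper: both Source A and Source B contain the identical `_axis_positions`
-- (the `raise ValueError` branch for non-positive tile/stride returns [] here; Pre_ excludes it)
def axisPositions (length tile stride : Int) : List Int :=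
  if tile ≤ 0 ∨ stride ≤ 0 then []
  else if tile > length then [0]
  else
    let positions := PySem.List.pyRange 0 (max (length - tile + 1) 1) stride
    if positions = [] then [0]
    else if positions.getLast? ≠ some (length - tile) then positions ++ [length - tile]
    else positions

def verify_defect_coverage (image_size : Int × Int) (tile_size : Int × Int) (stride : Int × Int) (defect_size : Int × Int) : Bool × Int :=
  let image_h := image_size.1; let image_w := image_size.2
  let defect_h := defect_size.1; let defect_w := defect_size.2
  if defect_h > image_h ∨ defect_w > image_w then (false, 0)
  else
    -- build_tile_grid: boxes = cross product of axis positions (nested loop append)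
    let y_positions := axisPositions image_h tile_size.1 stride.1
    let x_positions := axisPositions image_w tile_size.2 stride.2
    let boxes := y_positions.flatMap (fun y => x_positions.map
      (fun x => (y, x, min (y + tile_size.1) image_h, min (x + tile_size.2) image_w)))
    let uncovered := (PySem.List.pyRange 0 (image_h - defect_h + 1) 1).foldl (fun u defect_y =>
      (PySem.List.pyRange 0 (image_w - defect_w + 1) 1).foldl (fun u defect_x =>
        if boxes.any (fun b =>
            decide (b.1 ≤ defect_y) && decide (defect_y + defect_h ≤ b.2.2.1) &&
            decide (b.2.1 ≤ defect_x) && decide (defect_x + defect_w ≤ b.2.2.2))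
        then u else u + 1) u) 0
    (decide (uncovered = 0), uncovered)

-- ===== PORT B =====
def verify_defect_coverage_alt (image_size : Int × Int) (tile_size : Int × Int) (stride : Int × Int) (defect_size : Int × Int) : Bool × Int :=
  let image_h := image_size.1; let image_w := image_size.2
  let defect_h := defect_size.1; let defect_w := defect_size.2
  if defect_h > image_h ∨ defect_w > image_w then (false, 0)
  else
    let ys := axisPositions image_h tile_size.1 stride.1
    let xs := axisPositions image_w tile_size.2 stride.2
    let n_y := image_h - defect_h + 1
    let n_x := image_w - defect_w + 1
    let c_y : Int := ((PySem.List.pyRange 0 n_y 1).countP (fun dy =>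
      ys.any (fun y => decide (y ≤ dy) && decide (dy + defect_h ≤ min (y + tile_size.1) image_h))) : Int)
    let c_x : Int := ((PySem.List.pyRange 0 n_x 1).countP (fun dx =>
      xs.any (fun x => decide (x ≤ dx) && decide (dx + defect_w ≤ min (x + tile_size.2) image_w))) : Int)
    let uncovered := n_y * n_x - c_y * c_x
    (decide (uncovered = 0), uncovered)

-- ===== PRECONDITION & SPEC =====
-- Pre_ excludes exactly the inputs where Python A raises ValueError: non-positive tile or
-- stride reached past the defect-fits guard.
def Pre_verify_defect_coverage (image_size : Int × Int) (tile_size : Int × Int) (stride : Int × Int) (defect_size : Int × Int) : Prop :=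
  (defect_size.1 > image_size.1 ∨ defect_size.2 > image_size.2) ∨
  (0 < tile_size.1 ∧ 0 < tile_size.2 ∧ 0 < stride.1 ∧ 0 < stride.2)
instance (image_size : Int × Int) (tile_size : Int × Int) (stride : Int × Int) (defect_size : Int × Int) : Decidable (Pre_verify_defect_coverage image_size tile_size stride defect_size) := by unfold Pre_verify_defect_coverage; infer_instance

def pvWitness_verify_defect_coverage : (Int × Int) × (Int × Int) × (Int × Int) × (Int × Int) := ((10, 10), (4, 4), (2, 2), (5, 5))

def Spec_verify_defect_coverage (image_size : Int × Int) (tile_size : Int × Int) (stride : Int × Int) (defect_size : Int × Int) (out : Bool × Int) : Prop := out = verify_defect_coverage_alt image_size tile_size stride defect_size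
instance (image_size : Int × Int) (tile_size : Int × Int) (stride : Int × Int) (defect_size : Int × Int) (out : Bool × Int) : Decidable (Spec_verify_defect_coverage image_size tile_size stride defect_size out) := by unfold Spec_verify_defect_coverage; infer_instance

-- ===== CLAIM (what is proved, stated in full; the proofs are below) =====
def Claim_equal_verify_defect_coverage : Prop := ∀ (image_size : Int × Int) (tile_size : Int × Int) (stride : Int × Int) (defect_size : Int × Int), Dom_verify_defect_coverage image_size tile_size stride defect_size → Pre_verify_defect_coverage image_size tile_size stride defect_size → Spec_verify_defect_coverage image_size tile_size stride defect_size (verify_defect_coverage image_size tile_size stride defect_size)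

-- ===== LEMMAS AND PROOFS =====

-- any over the product grid factors into two per-axis anys
lemma any_prod {α β : Type} (ys : List α) (xs : List β) (f : α → Bool) (g : β → Bool)
    (F : α → β → Bool) (h : ∀ y x, F y x = (f y && g x)) :
    ys.any (fun y => xs.any (fun x => F y x)) = (ys.any f && xs.any g) := by
  induction ys with
  | nil => simp
  | cons y ys ih =>
    simp only [List.any_cons, ih]
    have hx : xs.any (fun x => F y x) = (f y && xs.any g) := by
      cases hf : f y with
      | false => simp [h, hf]
      | true => simp [h, hf]
    rw [hx]
    cases f y <;> cases ys.any f <;> cases xs.any g <;> rfl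

lemma foldl_if_count {α : Type} (L : List α) (p : α → Bool) (u : Int) :
    L.foldl (fun u x => if p x then u else u + 1) u
      = u + ((L.length : Int) - (L.countP p : Int)) := by
  induction L generalizing u with
  | nil => simp
  | cons x L ih =>
    have hc := L.countP_le_length (p := p)
    cases h : p x <;> simp [List.foldl_cons, h, ih, List.countP_cons] <;> omega

lemma foldl_add_ite {α : Type} (L : List α) (p : α → Bool) (a b u : Int) :
    L.foldl (fun u x => u + (if p x then a else b)) u
      = u + (L.countP p : Int) * a + ((L.length : Int) - (L.countP p : Int)) * b := by
  induction L generalizing u with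
  | nil => simp
  | cons x L ih =>
    cases h : p x <;> simp [List.foldl_cons, h, ih, List.countP_cons] <;> push_cast <;> ring

lemma foldl_ptwise {α : Type} (L : List α) (f g : Int → α → Int)
    (h : ∀ u x, f u x = g u x) (u : Int) : L.foldl f u = L.foldl g u := by
  induction L generalizing u with
  | nil => rfl
  | cons x L ih => simp only [List.foldl_cons, h, ih]

lemma countP_const_and {α : Type} (L : List α) (c : Bool) (q : α → Bool) :
    L.countP (fun x => c && q x) = if c then L.countP q else 0 := by
  cases c <;> simp

-- the core count identity
lemma grid_count (H W dh dw th tw : Int) (ys xs : List Int)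
    (hdh : dh ≤ H) (hdw : dw ≤ W) :
    (PySem.List.pyRange 0 (H - dh + 1) 1).foldl (fun u dy =>
      (PySem.List.pyRange 0 (W - dw + 1) 1).foldl (fun u dx =>
        if (ys.flatMap (fun y => xs.map (fun x => (y, x, min (y + th) H, min (x + tw) W)))).any
            (fun b => decide (b.1 ≤ dy) && decide (dy + dh ≤ b.2.2.1) &&
              decide (b.2.1 ≤ dx) && decide (dx + dw ≤ b.2.2.2))
        then u else u + 1) u) 0
    = (H - dh + 1) * (W - dw + 1)
      - ((PySem.List.pyRange 0 (H - dh + 1) 1).countP (fun dy =>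
          ys.any (fun y => decide (y ≤ dy) && decide (dy + dh ≤ min (y + th) H))) : Int)
        * ((PySem.List.pyRange 0 (W - dw + 1) 1).countP (fun dx =>
          xs.any (fun x => decide (x ≤ dx) && decide (dx + dw ≤ min (x + tw) W))) : Int) := by
  set LY := PySem.List.pyRange 0 (H - dh + 1) 1 with hLY
  set LX := PySem.List.pyRange 0 (W - dw + 1) 1 with hLX
  set py : Int → Int → Bool := fun dy y => decide (y ≤ dy) && decide (dy + dh ≤ min (y + th) H) with hpy
  set px : Int → Int → Bool := fun dx x => decide (x ≤ dx) && decide (dx + dw ≤ min (x + tw) W) with hpx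
  have hfac : ∀ dy dx,
      (ys.flatMap (fun y => xs.map (fun x => (y, x, min (y + th) H, min (x + tw) W)))).any
        (fun b => decide (b.1 ≤ dy) && decide (dy + dh ≤ b.2.2.1) &&
          decide (b.2.1 ≤ dx) && decide (dx + dw ≤ b.2.2.2))
      = (ys.any (py dy) && xs.any (px dx)) := by
    intro dy dx
    rw [List.any_flatMap]
    simp only [List.any_map, Function.comp_def]
    exact any_prod ys xs (py dy) (px dx)
      (fun y x => decide (y ≤ dy) && decide (dy + dh ≤ min (y + th) H) &&
        decide (x ≤ dx) && decide (dx + dw ≤ min (x + tw) W))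
      (by intro y x; simp only [hpy, hpx, Bool.and_assoc])
  have hlenY : ((LY.length : Int)) = H - dh + 1 := by
    rw [hLY, PySem.List.length_pyRange_one]
    have : (0:Int) ≤ H - dh + 1 := by omega
    omega
  have hlenX : ((LX.length : Int)) = W - dw + 1 := by
    rw [hLX, PySem.List.length_pyRange_one]
    have : (0:Int) ≤ W - dw + 1 := by omega
    omega
  set cX : Int := (LX.countP (fun dx => xs.any (px dx)) : Int) with hcX
  have step1 : ∀ (u : Int) (dy : Int),
      LX.foldl (fun u dx =>
        if (ys.flatMap (fun y => xs.map (fun x => (y, x, min (y + th) H, min (x + tw) W)))).any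
            (fun b => decide (b.1 ≤ dy) && decide (dy + dh ≤ b.2.2.1) &&
              decide (b.2.1 ≤ dx) && decide (dx + dw ≤ b.2.2.2))
        then u else u + 1) u
      = u + (if ys.any (py dy) then (W - dw + 1) - cX else (W - dw + 1)) := by
    intro u dy
    have : LX.foldl (fun u dx =>
        if (ys.flatMap (fun y => xs.map (fun x => (y, x, min (y + th) H, min (x + tw) W)))).any
            (fun b => decide (b.1 ≤ dy) && decide (dy + dh ≤ b.2.2.1) &&
              decide (b.2.1 ≤ dx) && decide (dx + dw ≤ b.2.2.2))
        then u else u + 1) u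
        = LX.foldl (fun u dx => if (ys.any (py dy) && xs.any (px dx)) then u else u + 1) u := by
      apply foldl_ptwise
      intro u dx
      rw [hfac]
    rw [this, foldl_if_count, countP_const_and]
    cases h : ys.any (py dy) <;> simp [h, hlenX, hcX]
  have step2 : LY.foldl (fun u dy =>
      LX.foldl (fun u dx =>
        if (ys.flatMap (fun y => xs.map (fun x => (y, x, min (y + th) H, min (x + tw) W)))).any
            (fun b => decide (b.1 ≤ dy) && decide (dy + dh ≤ b.2.2.1) &&
              decide (b.2.1 ≤ dx) && decide (dx + dw ≤ b.2.2.2))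
        then u else u + 1) u) 0
      = LY.foldl (fun u dy =>
          u + (if ys.any (py dy) then (W - dw + 1) - cX else (W - dw + 1))) 0 := by
    apply foldl_ptwise
    intro u dy
    exact step1 u dy
  rw [step2, foldl_add_ite, hlenY]
  ring

-- ===== VERDICT (by name: the statement is the Claim_ definition above) =====
theorem verify_defect_coverage_spec : Claim_equal_verify_defect_coverage := by
  intro image_size tile_size stride defect_size _ _
  unfold Spec_verify_defect_coverage verify_defect_coverage verify_defect_coverage_alt
  by_cases hguard : defect_size.1 > image_size.1 ∨ defect_size.2 > image_size.2
  · simp only [hguard, if_pos, if_true]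
  · simp only [hguard, if_false, if_neg, not_false_iff]
    have hdh : defect_size.1 ≤ image_size.1 := by push_neg at hguard; exact hguard.1
    have hdw : defect_size.2 ≤ image_size.2 := by push_neg at hguard; exact hguard.2
    rw [grid_count image_size.1 image_size.2 defect_size.1 defect_size.2 tile_size.1 tile_size.2
      (axisPositions image_size.1 tile_size.1 stride.1)
      (axisPositions image_size.2 tile_size.2 stride.2) hdh hdw]
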